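-- pv_equiv track=rewrite | github.com/KenTerakado/python-practice | test.py | rc2
-- ===== SOURCE A (Python) =====
-- def f(n):
--     if (n == 0): return 1
--     n = abs(n)
--     count = 0
--     while (n > 0):
--         count += 1
--         n //= 10
--     return count
--
-- def rc2(m):
--     if (not(isinstance(m, int)) or (m < 0)): return False
--     start = 0
--     while True:
--         count = 0
--         for n in range(start, start+3):
--             count += f(n)
--         if (count > 9): break
--         start += 1
--     return (m == start)
-- ===== SOURCE B (Python) =====
-- def rc2(m):
--     # Closed form: the search loop in A always stops at 998 (digit sums of
--     # 998,999,1000 are 3+3+4 = 10 > 9, and every earlier start sums to <= 9).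
--     return isinstance(m, int) and m >= 0 and m == 998
-- ===== Notes on version B (the rewrite author's own statement) =====
-- stated objective: simpler
-- what changed: Replaced A's unbounded search loop (with a digit-count helper f) by the closed-form membership test against the value the loop always converges to (998), keeping the non-negative-int guard.
import Mathlib
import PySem

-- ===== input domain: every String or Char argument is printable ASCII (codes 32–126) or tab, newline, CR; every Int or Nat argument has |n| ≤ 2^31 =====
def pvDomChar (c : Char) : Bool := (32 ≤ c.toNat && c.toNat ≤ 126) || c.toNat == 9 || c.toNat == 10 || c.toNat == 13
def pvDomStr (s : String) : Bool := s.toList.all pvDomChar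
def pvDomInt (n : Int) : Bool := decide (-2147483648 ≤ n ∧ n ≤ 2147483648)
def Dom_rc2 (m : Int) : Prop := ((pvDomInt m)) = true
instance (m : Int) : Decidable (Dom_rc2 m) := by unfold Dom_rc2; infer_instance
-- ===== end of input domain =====

-- Header: B replaces A's search loop by the closed form m == 998 (simpler).

-- ===== PORT A =====
-- digit-count while loop of f: while n > 0: count += 1; n //= 10
-- fuel makes the recursion structural (fuel = n suffices since n // 10 < n for n > 0);
-- the loop body is exactly Python's: while n > 0: count += 1; n //= 10
def fDigLoop : Nat -> Nat -> Int -> Int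
  | 0, _, count => count
  | _, 0, count => count
  | fuel+1, n+1, count => fDigLoop fuel ((n+1)/10) (count+1)

def fA (n : Int) : Int :=
  if n == 0 then 1 else fDigLoop n.natAbs n.natAbs 0

-- the while True loop of rc2; fuel 1000 suffices exactly (the break fires at start = 998)
def rc2Loop : Nat -> Int -> Int
  | 0, start => start
  | fuel+1, start =>
    let count := fA start + fA (start+1) + fA (start+2)
    if count > 9 then start else rc2Loop fuel (start+1)

def rc2 (m : Int) : Bool :=
  if m < 0 then false else (m == rc2Loop 1000 0)

-- ===== PORT B =====
def rc2_alt (m : Int) : Bool := decide (0 <= m) && (m == 998)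

-- ===== PRECONDITION & SPEC =====
def Spec_rc2 (m : Int) (out : Bool) : Prop := out = rc2_alt m
instance (m : Int) (out : Bool) : Decidable (Spec_rc2 m out) := by unfold Spec_rc2; infer_instance

-- ===== CLAIM (what is proved, stated in full; the proofs are below) =====
def Claim_equal_rc2 : Prop := ∀ (m : Int), Dom_rc2 m → Spec_rc2 m (rc2 m)

-- ===== LEMMAS AND PROOFS =====

-- digit-count facts about fDigLoop / fA used by the loop invariant
theorem digLoop_zero (f : Nat) (c : Int) : fDigLoop f 0 c = c := by cases f <;> rfl

theorem digLoop_small (f n : Nat) (c : Int) (h1 : 0 < n) (h2 : n < 10) (hf : 0 < f) :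
    fDigLoop f n c = c + 1 := by
  obtain ⟨f, rfl⟩ : ∃ f', f = f' + 1 := ⟨f - 1, by omega⟩
  obtain ⟨k, rfl⟩ : ∃ k, n = k + 1 := ⟨n - 1, by omega⟩
  show fDigLoop f ((k+1)/10) (c+1) = c + 1
  have h : (k+1)/10 = 0 := by omega
  rw [h, digLoop_zero]

theorem digLoop_med (f n : Nat) (c : Int) (h1 : 10 ≤ n) (h2 : n < 100) (hf : 2 ≤ f) :
    fDigLoop f n c = c + 2 := by
  obtain ⟨f, rfl⟩ : ∃ f', f = f' + 1 := ⟨f - 1, by omega⟩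
  obtain ⟨k, rfl⟩ : ∃ k, n = k + 1 := ⟨n - 1, by omega⟩
  show fDigLoop f ((k+1)/10) (c+1) = c + 2
  have := digLoop_small f ((k+1)/10) (c+1) (by omega) (by omega) (by omega)
  omega

theorem digLoop_big (f n : Nat) (c : Int) (h1 : 100 ≤ n) (h2 : n < 1000) (hf : 3 ≤ f) :
    fDigLoop f n c = c + 3 := by
  obtain ⟨f, rfl⟩ : ∃ f', f = f' + 1 := ⟨f - 1, by omega⟩
  obtain ⟨k, rfl⟩ : ∃ k, n = k + 1 := ⟨n - 1, by omega⟩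
  show fDigLoop f ((k+1)/10) (c+1) = c + 3
  have := digLoop_med f ((k+1)/10) (c+1) (by omega) (by omega) (by omega)
  omega

theorem fA_le3 (n : Int) (h0 : 0 ≤ n) (h9 : n ≤ 999) : fA n ≤ 3 := by
  unfold fA
  by_cases hz : n = 0
  · simp [hz]
  · have hne : (n == 0) = false := by simp [hz]
    rw [hne]
    simp only [Bool.false_eq_true, if_false]
    have hk1 : 1 ≤ n.natAbs := by omega
    have hk9 : n.natAbs ≤ 999 := by omega
    by_cases ha : n.natAbs < 10
    · rw [digLoop_small _ _ _ (by omega) ha (by omega)]; omega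
    · by_cases hb : n.natAbs < 100
      · rw [digLoop_med _ _ _ (by omega) hb (by omega)]; omega
      · rw [digLoop_big _ _ _ (by omega) (by omega) (by omega)]; omega

theorem rc2Loop_inv : ∀ (fuel : Nat) (start : Int),
    0 ≤ start → start ≤ 998 → (1000 : Int) ≤ start + fuel → rc2Loop fuel start = 998 := by
  intro fuel
  induction fuel with
  | zero => intro start h0 h8 hf; exfalso; push_cast at hf; omega
  | succ f ih =>
    intro start h0 h8 hf
    show (if fA start + fA (start+1) + fA (start+2) > 9 then start else rc2Loop f (start+1)) = 998
    by_cases h : start = 998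
    · subst h
      have hc : fA 998 + fA (998+1) + fA (998+2) = 10 := by decide
      rw [if_pos (by omega)]
    · have c1 := fA_le3 start h0 (by omega)
      have c2 := fA_le3 (start+1) (by omega) (by omega)
      have c3 := fA_le3 (start+2) (by omega) (by omega)
      rw [if_neg (by omega)]
      exact ih (start+1) (by omega) (by omega) (by push_cast at hf ⊢; omega)

theorem rc2Loop_eval : rc2Loop 1000 0 = 998 :=
  rc2Loop_inv 1000 0 (by norm_num) (by norm_num) (by norm_num)

-- ===== VERDICT (by name: the statement is the Claim_ definition above) =====
theorem rc2_spec : Claim_equal_rc2 := by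
  intro m _
  unfold Spec_rc2 rc2 rc2_alt
  rw [rc2Loop_eval]
  split_ifs with h
  · have hne : ¬ (m == 998) = true := by simp; omega
    simp [hne]
  · have hle : (0 : Int) ≤ m := by omega
    simp [hle]
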